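-- pv_equiv track=rewrite | github.com/Marugannwg/LLM_Chatlog_Typology | pipeline_overview.py | _assign_macro_type
-- ===== SOURCE A (Python) =====
-- CLUSTER_GROUPS = {
--     # PERFORMATIVE
--     "perf_technical": [0, 11, 23, 30, 34, 40, 52],
--     "perf_other": [2, 26, 27, 33, 35, 41, 53],
--     "perf_etsy": [15],
--
--     # EXPRESSIVE
--     "expr_narrative_mill": [7, 12, 19, 22, 36, 38, 39, 48, 50, 54, 59],
--     "expr_other": [1, 6, 8, 10, 14, 24, 25, 32],
--
--     # MIXED
--     "mixed_business": [5, 21, 31, 44, 45, 46, 47, 51, 55, 58],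
--     "mixed_misc": [3, 4, 9, 13, 16, 17, 18, 20, 28, 29, 37, 41, 42, 43, 49, 56, 57],
-- }
--
-- def _assign_macro_type(cid: int) -> str:
--     for key, ids in CLUSTER_GROUPS.items():
--         if cid in ids:
--             if key.startswith("perf_"):
--                 return "Performative"
--             if key.startswith("expr_"):
--                 return "Expressive"
--             if key.startswith("mixed_"):
--                 return "Mixed"
--     return "Other"
-- ===== SOURCE B (Python) =====
-- CLUSTER_GROUPS = {
--     # PERFORMATIVE
--     "perf_technical": [0, 11, 23, 30, 34, 40, 52],
--     "perf_other": [2, 26, 27, 33, 35, 41, 53],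
--     "perf_etsy": [15],
--
--     # EXPRESSIVE
--     "expr_narrative_mill": [7, 12, 19, 22, 36, 38, 39, 48, 50, 54, 59],
--     "expr_other": [1, 6, 8, 10, 14, 24, 25, 32],
--
--     # MIXED
--     "mixed_business": [5, 21, 31, 44, 45, 46, 47, 51, 55, 58],
--     "mixed_misc": [3, 4, 9, 13, 16, 17, 18, 20, 28, 29, 37, 41, 42, 43, 49, 56, 57],
-- }
--
--
-- def _category(key: str) -> str:
--     if key.startswith("perf_"):
--         return "Performative"
--     if key.startswith("expr_"):
--         return "Expressive"
--     return "Mixed"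
--
--
-- # Inverted index built once: cluster id -> macro type.
-- # setdefault keeps the FIRST group containing an id (id 41 -> Performative).
-- _INDEX = {}
-- for _key, _ids in CLUSTER_GROUPS.items():
--     for _cid in _ids:
--         _INDEX.setdefault(_cid, _category(_key))
--
--
-- def _assign_macro_type(cid: int) -> str:
--     return _INDEX.get(cid, "Other")
-- ===== Notes on version B (the rewrite author's own statement) =====
-- stated objective: idiomatic
-- what changed: Replaces the per-call scan over CLUSTER_GROUPS by a precomputed inverted index dict (cluster id -> macro type, first group wins via setdefault), so each call is a single dict lookup with default 'Other'.
import Mathlib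
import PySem

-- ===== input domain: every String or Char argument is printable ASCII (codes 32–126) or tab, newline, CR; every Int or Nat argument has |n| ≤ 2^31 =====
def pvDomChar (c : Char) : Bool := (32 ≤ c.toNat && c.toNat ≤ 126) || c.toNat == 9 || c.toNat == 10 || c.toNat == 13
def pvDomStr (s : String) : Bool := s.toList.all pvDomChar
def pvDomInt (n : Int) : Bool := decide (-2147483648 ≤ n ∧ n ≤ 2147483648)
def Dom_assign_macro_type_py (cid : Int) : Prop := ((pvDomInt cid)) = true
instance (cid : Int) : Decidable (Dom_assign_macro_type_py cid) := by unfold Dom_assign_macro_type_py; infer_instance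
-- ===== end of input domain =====

-- B replaces A's per-call scan over CLUSTER_GROUPS by a precomputed inverted index (id -> macro type, first group wins), making each call a single lookup (idiomatic).


-- ===== PORT A =====
-- CLUSTER_GROUPS: the module-level dict, as an insertion-ordered association list (shared literal data)
def clusterGroups : List (String × List Int) :=
  [("perf_technical", [0, 11, 23, 30, 34, 40, 52]),
   ("perf_other", [2, 26, 27, 33, 35, 41, 53]),
   ("perf_etsy", [15]),
   ("expr_narrative_mill", [7, 12, 19, 22, 36, 38, 39, 48, 50, 54, 59]),
   ("expr_other", [1, 6, 8, 10, 14, 24, 25, 32]),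
   ("mixed_business", [5, 21, 31, 44, 45, 46, 47, 51, 55, 58]),
   ("mixed_misc", [3, 4, 9, 13, 16, 17, 18, 20, 28, 29, 37, 41, 42, 43, 49, 56, 57])]

-- A's for-loop with early returns, as structural recursion over the remaining items
def assignLoop (cid : Int) : List (String × List Int) → String
  | [] => "Other"
  | (key, ids) :: rest =>
    if ids.contains cid then
      if PySem.Str.startswith key "perf_" then "Performative"
      else if PySem.Str.startswith key "expr_" then "Expressive"
      else if PySem.Str.startswith key "mixed_" then "Mixed"
      else assignLoop cid rest
    else assignLoop cid rest

def assign_macro_type_py (cid : Int) : String := assignLoop cid clusterGroups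

-- ===== PORT B =====
def categoryB (key : String) : String :=
  if PySem.Str.startswith key "perf_" then "Performative"
  else if PySem.Str.startswith key "expr_" then "Expressive"
  else "Mixed"

-- Source B's module-level index build: _INDEX.setdefault(c, cat) = insert only if the key is absent
def macroIndex : PySem.Dict Int String :=
  clusterGroups.foldl
    (fun d kv =>
      kv.2.foldl (fun d c => if d.contains c then d else d.insert c (categoryB kv.1)) d)
    PySem.Dict.empty

def assign_macro_type_py_alt (cid : Int) : String := macroIndex.getD cid "Other"

-- ===== PRECONDITION & SPEC =====
def Spec_assign_macro_type_py (cid : Int) (out : String) : Prop := out = assign_macro_type_py_alt cid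
instance (cid : Int) (out : String) : Decidable (Spec_assign_macro_type_py cid out) := by unfold Spec_assign_macro_type_py; infer_instance

-- ===== CLAIM (what is proved, stated in full; the proofs are below) =====
def Claim_equal_assign_macro_type_py : Prop := ∀ (cid : Int), Dom_assign_macro_type_py cid → Spec_assign_macro_type_py cid (assign_macro_type_py cid)

-- ===== LEMMAS AND PROOFS =====

-- the inverted index B builds, written out (order = first occurrence across the groups)
def macroItems : List (Int × String) := [(0, "Performative"), (11, "Performative"), (23, "Performative"), (30, "Performative"), (34, "Performative"), (40, "Performative"), (52, "Performative"), (2, "Performative"), (26, "Performative"), (27, "Performative"), (33, "Performative"), (35, "Performative"), (41, "Performative"), (53, "Performative"), (15, "Performative"), (7, "Expressive"), (12, "Expressive"), (19, "Expressive"), (22, "Expressive"), (36, "Expressive"), (38, "Expressive"), (39, "Expressive"), (48, "Expressive"), (50, "Expressive"), (54, "Expressive"), (59, "Expressive"), (1, "Expressive"), (6, "Expressive"), (8, "Expressive"), (10, "Expressive"), (14, "Expressive"), (24, "Expressive"), (25, "Expressive"), (32, "Expressive"), (5, "Mixed"), (21, "Mixed"), (31, "Mixed"), (44, "Mixed"),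 (45, "Mixed"), (46, "Mixed"), (47, "Mixed"), (51, "Mixed"), (55, "Mixed"), (58, "Mixed"), (3, "Mixed"), (4, "Mixed"), (9, "Mixed"), (13, "Mixed"), (16, "Mixed"), (17, "Mixed"), (18, "Mixed"), (20, "Mixed"), (28, "Mixed"), (29, "Mixed"), (37, "Mixed"), (42, "Mixed"), (43, "Mixed"), (49, "Mixed"), (56, "Mixed"), (57, "Mixed")]

set_option maxRecDepth 100000 in
lemma macroIndex_eq : macroIndex = PySem.Dict.mk macroItems := by decide

-- A returns "Other" on any cid outside [0, 59], since every id in the groups lies in [0, 59]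
lemma assignLoop_other (cid : Int) (hc : cid < 0 ∨ 59 < cid) :
    ∀ (gs : List (String × List Int)),
      gs.all (fun kv => kv.2.all (fun i => decide (0 ≤ i ∧ i ≤ 59))) = true →
      assignLoop cid gs = "Other"
  | [], _ => rfl
  | (key, ids) :: rest, h => by
    simp only [List.all_cons, Bool.and_eq_true] at h
    have hcont : ids.contains cid = false := by
      rw [Bool.eq_false_iff]
      intro hb
      have hm : cid ∈ ids := by simpa using hb
      have := List.all_eq_true.mp h.1 cid hm
      simp at this; omega
    simp only [assignLoop, hcont, Bool.false_eq_true, if_false]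
    exact assignLoop_other cid hc rest h.2

-- B's index contains no key outside [0, 59]
lemma get?_none_of_bounds (cid : Int) (hc : cid < 0 ∨ 59 < cid) :
    ∀ (ps : List (Int × String)),
      ps.all (fun p => decide (0 ≤ p.1 ∧ p.1 ≤ 59)) = true →
      (PySem.Dict.mk ps).get? cid = none
  | [], _ => rfl
  | (k, v) :: rest, h => by
    simp only [List.all_cons, Bool.and_eq_true] at h
    rw [PySem.Dict.get?_mk_cons]
    have hne : (k == cid) = false := by
      simp only [beq_eq_false_iff_ne, ne_eq]
      have := h.1; simp at this; omega
    rw [hne, if_neg (by simp)]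
    exact get?_none_of_bounds cid hc rest h.2

-- ===== VERDICT (by name: the statement is the Claim_ definition above) =====
set_option maxRecDepth 10000 in
theorem assign_macro_type_py_spec : Claim_equal_assign_macro_type_py := by
  intro cid _
  unfold Spec_assign_macro_type_py
  by_cases h : 0 ≤ cid ∧ cid ≤ 59
  · obtain ⟨h1, h2⟩ := h
    interval_cases cid <;> decide
  · have hc : cid < 0 ∨ 59 < cid := by omega
    rw [assign_macro_type_py, assignLoop_other cid hc clusterGroups (by decide),
        assign_macro_type_py_alt]
    have hn : macroIndex.get? cid = none := by
      rw [macroIndex_eq]; exact get?_none_of_bounds cid hc macroItems (by decide)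
    simp [PySem.Dict.getD, hn]
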